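-- pv_equiv track=rewrite | github.com/BlueSpikeKol/Spiky_Mind | architect_module/function_creation/Research/testResult.py | find_word_positions
-- ===== SOURCE A (Python) =====
-- def find_word_positions(letter_list, word):
--     """
--     Searches for occurrences of a word within a list of letters and returns a nested list of indices
--     representing the starting and ending positions of the word within the list.
--
--     Parameters:
--     letter_list (list of str): A one-dimensional list of single-letter strings.
--     word (str): The word to search for within the list of letters.
--
--     Returns:
--     list of lists: A nested list where each inner list contains two integers, the start and end index of the word found.
--     """
--     positions = []
--     word_length = len(word)
--     for i in range(len(letter_list) - word_length + 1):
--         # Extract a substring of the same length as the word from the current position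
--         substring = ''.join(letter_list[i:i + word_length])
--         # If the substring matches the word, store the start and end indices
--         if substring == word:
--             positions.append([i, i + word_length - 1])
--     return positions
-- ===== SOURCE B (Python) =====
-- def find_word_positions(letter_list, word):
--     m = len(word)
--     full = ''.join(letter_list)
--     off = [0]
--     t = 0
--     for s in letter_list:
--         t += len(s)
--         off.append(t)
--     return [[i, i + m - 1] for i in range(len(letter_list) - m + 1)
--             if full[off[i]:off[i + m]] == word]
-- ===== Notes on version B (the rewrite author's own statement) =====
-- stated objective: alternative
-- what changed: B joins the letter list once and precomputes prefix-length offsets, testing each window as a slice of the single precomputed string (filter+map over candidate starts) instead of re-joining every window and accumulating matches in a loop.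
import Mathlib
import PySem

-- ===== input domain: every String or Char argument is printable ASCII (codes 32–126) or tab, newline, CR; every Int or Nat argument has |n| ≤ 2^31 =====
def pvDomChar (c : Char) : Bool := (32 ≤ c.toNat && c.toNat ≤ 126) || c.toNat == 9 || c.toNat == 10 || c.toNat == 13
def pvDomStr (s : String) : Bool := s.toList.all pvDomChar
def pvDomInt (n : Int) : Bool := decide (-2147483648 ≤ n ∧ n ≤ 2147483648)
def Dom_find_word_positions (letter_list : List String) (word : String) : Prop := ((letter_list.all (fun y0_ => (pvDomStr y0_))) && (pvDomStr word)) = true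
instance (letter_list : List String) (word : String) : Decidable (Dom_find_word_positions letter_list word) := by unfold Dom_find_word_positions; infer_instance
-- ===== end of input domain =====

-- B joins the list ONCE and precomputes prefix-length offsets, so each window test is a
-- slice of the precomputed string instead of a fresh per-window join (objective: alternative).

-- ===== PORT A =====
def find_word_positions (letter_list : List String) (word : String) : List (List Int) :=
  let word_length := PySem.Str.len word
  (PySem.List.pyRange 0 (PySem.List.len letter_list - word_length + 1) 1).foldl
    (fun positions i =>
      let substring := PySem.Str.join "" (PySem.List.slice letter_list (some i) (some (i + word_length)))
      if substring == word then positions ++ [[i, i + word_length - 1]] else positions) []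

-- ===== PORT B =====
def find_word_positions_alt (letter_list : List String) (word : String) : List (List Int) :=
  let m := PySem.Str.len word
  let full := PySem.Str.join "" letter_list
  let ot := letter_list.foldl
    (fun (p : List Int × Int) s => (p.1 ++ [p.2 + PySem.Str.len s], p.2 + PySem.Str.len s)) ([0], 0)
  let off := ot.1
  ((PySem.List.pyRange 0 (PySem.List.len letter_list - m + 1) 1).filter
      (fun i => PySem.Str.slice full (some (PySem.List.pyGetD off i 0)) (some (PySem.List.pyGetD off (i + m) 0)) == word)).map
    (fun i => [i, i + m - 1])

-- ===== PRECONDITION & SPEC =====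
def Spec_find_word_positions (letter_list : List String) (word : String) (out : List (List Int)) : Prop := out = find_word_positions_alt letter_list word
instance (letter_list : List String) (word : String) (out : List (List Int)) : Decidable (Spec_find_word_positions letter_list word out) := by unfold Spec_find_word_positions; infer_instance

-- ===== CLAIM (what is proved, stated in full; the proofs are below) =====
def Claim_equal_find_word_positions : Prop := ∀ (letter_list : List String) (word : String), Dom_find_word_positions letter_list word → Spec_find_word_positions letter_list word (find_word_positions letter_list word)

-- ===== LEMMAS AND PROOFS =====

-- prefix sums of element lengths, as B's loop produces them
def pvPsums : List String → Int → List Int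
  | [], _ => []
  | s :: r, t => (t + PySem.Str.len s) :: pvPsums r (t + PySem.Str.len s)

theorem pvFoldl_off (xs : List String) (acc : List Int) (t : Int) :
    (xs.foldl (fun (p : List Int × Int) s => (p.1 ++ [p.2 + PySem.Str.len s], p.2 + PySem.Str.len s)) (acc, t)).1
      = acc ++ pvPsums xs t := by
  induction xs generalizing acc t with
  | nil => simp [pvPsums]
  | cons s r ih =>
      rw [List.foldl_cons, ih]
      simp [pvPsums]

-- total character length of the first k elements
def pvS (ll : List String) (k : Nat) : Nat := (((ll.take k).map String.toList).flatten).length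

theorem pvPsums_eq (xs : List String) (t : Int) :
    pvPsums xs t = (List.range xs.length).map (fun k => t + (pvS xs (k + 1) : Int)) := by
  induction xs generalizing t with
  | nil => simp [pvPsums]
  | cons s r ih =>
      simp only [pvPsums, List.length_cons, List.range_succ_eq_map, List.map_cons, List.map_map]
      congr 1
      · simp [pvS]
      · rw [ih (t + PySem.Str.len s)]
        apply List.map_congr_left
        intro k _
        simp [pvS, Function.comp, PySem.Str.len_eq]
        ring

theorem pvOff_eq (ll : List String) :
    (0 : Int) :: pvPsums ll 0 = (List.range (ll.length + 1)).map (fun k => (pvS ll k : Int)) := by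
  rw [pvPsums_eq, List.range_succ_eq_map, List.map_cons, List.map_map]
  congr 1
  apply List.map_congr_left; intro k _; simp

theorem pvOff_get (ll : List String) (k : Nat) (hk : k ≤ ll.length) :
    PySem.List.pyGetD ((0 : Int) :: pvPsums ll 0) (k : Int) 0 = (pvS ll k : Int) := by
  rw [PySem.List.pyGetD_of_nonneg _ _ (Int.natCast_nonneg k), pvOff_eq]
  rw [Int.toNat_natCast]
  rw [List.getD_eq_getElem?_getD, List.getElem?_map, List.getElem?_range (by omega)]
  simp

theorem pvChars_join_empty (xss : List (List Char)) : PySem.Chars.join [] xss = xss.flatten := by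
  induction xss with
  | nil => simp [PySem.Chars.join_nil]
  | cons p rest ih =>
      cases rest with
      | nil => simp [PySem.Chars.join_singleton]
      | cons q r => rw [PySem.Chars.join_cons_cons]; simp [ih]

theorem pvFlatten_window (Ls : List (List Char)) (i m : Nat) :
    ((Ls.drop i).take m).flatten
      = (Ls.flatten.drop (((Ls.take i).flatten).length)).take
          ((((Ls.take (i + m)).flatten).length) - (((Ls.take i).flatten).length)) := by
  have hsplit : Ls = Ls.take i ++ (Ls.drop i).take m ++ Ls.drop (i + m) := by
    rw [List.append_assoc]
    nth_rewrite 1 [← List.take_append_drop i Ls]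
    congr 1
    rw [← List.drop_drop]
    exact (List.take_append_drop m (Ls.drop i)).symm
  have htake : Ls.take (i + m) = Ls.take i ++ (Ls.drop i).take m := (List.take_add ..)
  have hmain : Ls.flatten = (Ls.take i).flatten ++ ((Ls.drop i).take m).flatten ++ (Ls.drop (i + m)).flatten := by
    conv_lhs => rw [hsplit]
    rw [List.flatten_append, List.flatten_append]
  have hAB : (Ls.take (i + m)).flatten = (Ls.take i).flatten ++ ((Ls.drop i).take m).flatten := by
    rw [htake, List.flatten_append]
  rw [hmain, hAB, List.append_assoc, List.drop_left, List.length_append,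
      Nat.add_sub_cancel_left, List.take_left]

-- the window condition: A's per-window join equals B's slice of the precomputed join
theorem pvWindow (ll : List String) (i m : Nat) :
    PySem.Str.join "" (PySem.List.slice ll (some (i : Int)) (some ((i + m : Nat) : Int)))
      = PySem.Str.slice (PySem.Str.join "" ll) (some ((pvS ll i : Nat) : Int)) (some ((pvS ll (i + m) : Nat) : Int)) := by
  apply String.toList_injective
  rw [PySem.Str.toList_join, PySem.Str.toList_slice, PySem.Chars.slice_eq_listSlice,
      PySem.Str.toList_join]
  rw [show ("".toList) = ([] : List Char) from rfl]
  rw [PySem.List.slice_natCast, PySem.List.slice_natCast,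
      pvChars_join_empty, pvChars_join_empty]
  rw [Nat.add_sub_cancel_left]
  simp only [pvS, List.map_take, List.map_drop]
  exact pvFlatten_window (ll.map String.toList) i m

theorem find_word_positions_spec' (letter_list : List String) (word : String) :
    find_word_positions letter_list word = find_word_positions_alt letter_list word := by
  unfold find_word_positions find_word_positions_alt
  simp only []
  rw [PySem.List.foldl_append_if
        (fun i => PySem.Str.join "" (PySem.List.slice letter_list (some i) (some (i + PySem.Str.len word))) == word)
        (fun i => [i, i + PySem.Str.len word - 1])]
  rw [pvFoldl_off, List.singleton_append, List.nil_append]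
  congr 1
  apply List.filter_congr
  intro i hi
  rw [PySem.List.mem_pyRange_one] at hi
  obtain ⟨h0, hub⟩ := hi
  have hlen : PySem.List.len letter_list = (letter_list.length : Int) := PySem.List.len_eq _
  have hm : PySem.Str.len word = (word.toList.length : Int) := PySem.Str.len_eq _
  set mN := word.toList.length
  have hiN : i = ((i.toNat : Nat) : Int) := (Int.toNat_of_nonneg h0).symm
  have hbound : i.toNat + mN ≤ letter_list.length := by
    rw [hlen, hm] at hub; omega
  rw [hiN, hm]
  rw [show ((i.toNat : Nat) : Int) + ((mN : Nat) : Int) = ((i.toNat + mN : Nat) : Int) by push_cast; ring]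
  rw [pvOff_get letter_list i.toNat (by omega), pvOff_get letter_list (i.toNat + mN) hbound]
  rw [pvWindow letter_list i.toNat mN]

-- ===== VERDICT (by name: the statement is the Claim_ definition above) =====
theorem find_word_positions_spec : Claim_equal_find_word_positions := by
  intro letter_list word _
  unfold Spec_find_word_positions
  exact find_word_positions_spec' letter_list word
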